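-- pv_equiv track=rewrite | github.com/tetraquark-rgb/Musical-analysis | mode_analysis.py | generate_chords
-- ===== SOURCE A (Python) =====
-- def generate_chords(mode_notes):
--     triads = []
--     tetrads = []
--     for i in range(len(mode_notes)):
--         root = mode_notes[i]
--         third = mode_notes[(i + 2) % len(mode_notes)]
--         fifth = mode_notes[(i + 4) % len(mode_notes)]
--         seventh = mode_notes[(i + 6) % len(mode_notes)]
--         triads.append([root, third, fifth])
--         tetrads.append([root, third, fifth, seventh])
--     return triads, tetrads
-- ===== SOURCE B (Python) =====
-- def generate_chords(mode_notes):
--     n = len(mode_notes)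
--     if n == 0:
--         return [], []
--     rot2 = mode_notes[2 % n:] + mode_notes[:2 % n]
--     rot4 = mode_notes[4 % n:] + mode_notes[:4 % n]
--     rot6 = mode_notes[6 % n:] + mode_notes[:6 % n]
--     triads = []
--     tetrads = []
--     for root, third, fifth, seventh in zip(mode_notes, rot2, rot4, rot6):
--         triads.append([root, third, fifth])
--         tetrads.append([root, third, fifth, seventh])
--     return triads, tetrads
-- ===== Notes on version B (the rewrite author's own statement) =====
-- stated objective: alternative
-- what changed: Replaces per-index modular lookups with three precomputed rotated copies of the note list traversed in parallel with zip.
import Mathlib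
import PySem

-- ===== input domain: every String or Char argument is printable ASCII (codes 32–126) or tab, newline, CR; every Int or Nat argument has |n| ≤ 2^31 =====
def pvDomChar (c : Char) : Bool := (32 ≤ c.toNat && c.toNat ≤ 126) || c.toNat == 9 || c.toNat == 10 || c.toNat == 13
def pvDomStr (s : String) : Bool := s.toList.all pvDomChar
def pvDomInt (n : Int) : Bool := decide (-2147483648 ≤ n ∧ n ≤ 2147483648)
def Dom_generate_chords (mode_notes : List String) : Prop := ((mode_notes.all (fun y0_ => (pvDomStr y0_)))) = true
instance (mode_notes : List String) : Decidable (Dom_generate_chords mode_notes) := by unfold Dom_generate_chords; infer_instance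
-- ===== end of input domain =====

-- B builds three rotated copies of the note list and zips them, instead of A's per-index modular lookups: an alternative decomposition, same cost.

-- ===== PORT A =====
def generate_chords (mode_notes : List String) : List (List String) × List (List String) :=
  (PySem.List.pyRange 0 (mode_notes.length : Int) 1).foldl
    (fun (acc : List (List String) × List (List String)) (i : Int) =>
      let root := PySem.List.pyGetD mode_notes i ""
      let third := PySem.List.pyGetD mode_notes (PySem.Int.mod (i + 2) (mode_notes.length : Int)) ""
      let fifth := PySem.List.pyGetD mode_notes (PySem.Int.mod (i + 4) (mode_notes.length : Int)) ""
      let seventh := PySem.List.pyGetD mode_notes (PySem.Int.mod (i + 6) (mode_notes.length : Int)) ""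
      (acc.1 ++ [[root, third, fifth]], acc.2 ++ [[root, third, fifth, seventh]]))
    ([], [])

-- ===== PORT B =====
-- mode_notes[k:] + mode_notes[:k]
def pvRot (xs : List String) (k : Int) : List String :=
  PySem.List.slice xs (some k) none ++ PySem.List.slice xs none (some k)

def generate_chords_alt (mode_notes : List String) : List (List String) × List (List String) :=
  if mode_notes.length = 0 then ([], [])
  else
    let n : Int := mode_notes.length
    let rot2 := pvRot mode_notes (PySem.Int.mod 2 n)
    let rot4 := pvRot mode_notes (PySem.Int.mod 4 n)
    let rot6 := pvRot mode_notes (PySem.Int.mod 6 n)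
    (mode_notes.zip (rot2.zip (rot4.zip rot6))).foldl
      (fun (acc : List (List String) × List (List String)) q =>
        (acc.1 ++ [[q.1, q.2.1, q.2.2.1]], acc.2 ++ [[q.1, q.2.1, q.2.2.1, q.2.2.2]]))
      ([], [])

-- ===== PRECONDITION & SPEC =====
def Spec_generate_chords (mode_notes : List String) (out : List (List String) × List (List String)) : Prop := out = generate_chords_alt mode_notes
instance (mode_notes : List String) (out : List (List String) × List (List String)) : Decidable (Spec_generate_chords mode_notes out) := by unfold Spec_generate_chords; infer_instance

-- ===== CLAIM (what is proved, stated in full; the proofs are below) =====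
def Claim_equal_generate_chords : Prop := ∀ (mode_notes : List String), Dom_generate_chords mode_notes → Spec_generate_chords mode_notes (generate_chords mode_notes)

-- ===== LEMMAS AND PROOFS =====
theorem pvRot_eq (xs : List String) (c : Int) (hc : 0 ≤ c) (h : 0 < xs.length) :
    pvRot xs (PySem.Int.mod c (xs.length : Int)) = xs.rotate c.toNat := by
  obtain ⟨m, rfl⟩ := Int.eq_ofNat_of_zero_le hc
  rw [PySem.Int.mod_natCast]
  unfold pvRot
  rw [PySem.List.slice_from xs (by positivity), PySem.List.slice_to xs (by positivity)]
  rw [Int.toNat_natCast, ← List.rotate_eq_drop_append_take (le_of_lt (Nat.mod_lt _ h)),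
    List.rotate_mod, Int.toNat_natCast]

theorem getP (xs : List String) (k : Nat) (c : Int) (cn : Nat) (hc : c = (cn : Int)) (h : 0 < xs.length) :
    PySem.List.pyGetD xs (PySem.Int.mod ((k:Int) + c) (xs.length:Int)) "" =
      xs[(k+cn) % xs.length]'(Nat.mod_lt _ h) := by
  subst hc
  have h2 : ((k:Int) + (cn:Int)) = ((k + cn : Nat):Int) := by push_cast; ring
  rw [h2, PySem.Int.mod_natCast, PySem.List.pyGetD_natCast, List.getD_eq_getElem]

theorem gc_main (xs : List String) : generate_chords xs = generate_chords_alt xs := by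
  rcases Nat.eq_zero_or_pos xs.length with h0 | hpos
  · obtain rfl := List.length_eq_zero_iff.mp h0
    decide
  · have hne : xs.length ≠ 0 := hpos.ne'
    unfold generate_chords generate_chords_alt
    rw [if_neg hne]
    rw [PySem.List.foldl_prod_mk
        (f := fun (a : List (List String)) (i : Int) => a ++
          [[PySem.List.pyGetD xs i "", PySem.List.pyGetD xs (PySem.Int.mod (i + 2) (xs.length : Int)) "",
            PySem.List.pyGetD xs (PySem.Int.mod (i + 4) (xs.length : Int)) ""]])
        (g := fun (a : List (List String)) (i : Int) => a ++
          [[PySem.List.pyGetD xs i "", PySem.List.pyGetD xs (PySem.Int.mod (i + 2) (xs.length : Int)) "",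
            PySem.List.pyGetD xs (PySem.Int.mod (i + 4) (xs.length : Int)) "",
            PySem.List.pyGetD xs (PySem.Int.mod (i + 6) (xs.length : Int)) ""]])]
    rw [PySem.List.foldl_prod_mk
        (f := fun (a : List (List String)) (q : String × String × String × String) => a ++ [[q.1, q.2.1, q.2.2.1]])
        (g := fun (a : List (List String)) (q : String × String × String × String) => a ++ [[q.1, q.2.1, q.2.2.1, q.2.2.2]])]
    rw [PySem.List.foldl_append_singleton_eq_map, PySem.List.foldl_append_singleton_eq_map,
        PySem.List.foldl_append_singleton_eq_map, PySem.List.foldl_append_singleton_eq_map]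
    simp only [List.nil_append]
    rw [pvRot_eq xs 2 (by norm_num) hpos, pvRot_eq xs 4 (by norm_num) hpos,
        pvRot_eq xs 6 (by norm_num) hpos]
    rw [PySem.List.pyRange_zero_nat, List.map_map]
    refine Prod.ext ?_ ?_
    · apply List.ext_getElem
      · simp [List.length_zip, List.length_rotate]
      · intro k hk1 hk2
        have hkn : k < xs.length := by
          simpa [List.length_zip, List.length_rotate] using hk1
        simp only [List.getElem_map, List.getElem_range, Function.comp_apply, List.getElem_zip,
          List.getElem_rotate,
          show (Int.toNat 2) = 2 from rfl, show (Int.toNat 4) = 4 from rfl,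
          show (Int.toNat 6) = 6 from rfl]
        rw [getP xs k 2 2 rfl hpos, getP xs k 4 4 rfl hpos]
        rw [PySem.List.pyGetD_natCast, List.getD_eq_getElem xs _ hkn]
    · apply List.ext_getElem
      · simp [List.length_zip, List.length_rotate]
      · intro k hk1 hk2
        have hkn : k < xs.length := by
          simpa [List.length_zip, List.length_rotate] using hk1
        simp only [List.getElem_map, List.getElem_range, List.getElem_zip,
          List.getElem_rotate,
          show (Int.toNat 2) = 2 from rfl, show (Int.toNat 4) = 4 from rfl,
          show (Int.toNat 6) = 6 from rfl]
        rw [getP xs k 2 2 rfl hpos, getP xs k 4 4 rfl hpos, getP xs k 6 6 rfl hpos]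
        rw [PySem.List.pyGetD_natCast, List.getD_eq_getElem xs _ hkn]

-- ===== VERDICT (by name: the statement is the Claim_ definition above) =====
theorem generate_chords_spec : Claim_equal_generate_chords := by
  intro xs _
  exact gc_main xs
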